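-- pv_equiv track=rewrite | github.com/Natsumeretsu/freqtrade_demo | 03_integration/trading_system/infrastructure/auto_risk.py | _drift_feature_counts
-- ===== SOURCE A (Python) =====
-- from typing import Any
--
-- def _drift_feature_counts(feature_reports: dict[str, Any]) -> dict[str, int]:
--     total = 0
--     warn = 0
--     crit = 0
--     missing_column = 0
--     other = 0
--
--     for _, r in feature_reports.items():
--         if not isinstance(r, dict):
--             continue
--         status = str(r.get("status") or "").strip()
--         if not status:
--             continue
--
--         if status == "missing_column":
--             missing_column += 1
--             total += 1
--             continue
--
--         if status == "warn":
--             warn += 1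
--             total += 1
--             continue
--
--         if status == "crit":
--             crit += 1
--             total += 1
--             continue
--
--         if status == "ok":
--             total += 1
--             continue
--
--         other += 1
--
--     return {
--         "total": int(total),
--         "warn": int(warn),
--         "crit": int(crit),
--         "missing_column": int(missing_column),
--         "other": int(other),
--     }
-- ===== SOURCE B (Python) =====
-- def _norm_status(r):
--     if not isinstance(r, dict):
--         return ""
--     return str(r.get("status") or "").strip()
--
-- def _drift_feature_counts(feature_reports: dict) -> dict:
--     statuses = [s for s in map(_norm_status, feature_reports.values()) if s]
--     counts = {}
--     for s in statuses:
--         counts[s] = counts.get(s, 0) + 1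
--     warn = counts.get("warn", 0)
--     crit = counts.get("crit", 0)
--     missing_column = counts.get("missing_column", 0)
--     ok = counts.get("ok", 0)
--     total = warn + crit + missing_column + ok
--     other = len(statuses) - total
--     return {
--         "total": int(total),
--         "warn": int(warn),
--         "crit": int(crit),
--         "missing_column": int(missing_column),
--         "other": int(other),
--     }
-- ===== Notes on version B (the rewrite author's own statement) =====
-- stated objective: idiomatic
-- what changed: Replaces the five-accumulator if/elif cascade with building the list of normalized non-empty statuses, a frequency table over it, and closed-form extraction (total = sum of the four recognized counts, other = len(statuses) - total).
import Mathlib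
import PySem

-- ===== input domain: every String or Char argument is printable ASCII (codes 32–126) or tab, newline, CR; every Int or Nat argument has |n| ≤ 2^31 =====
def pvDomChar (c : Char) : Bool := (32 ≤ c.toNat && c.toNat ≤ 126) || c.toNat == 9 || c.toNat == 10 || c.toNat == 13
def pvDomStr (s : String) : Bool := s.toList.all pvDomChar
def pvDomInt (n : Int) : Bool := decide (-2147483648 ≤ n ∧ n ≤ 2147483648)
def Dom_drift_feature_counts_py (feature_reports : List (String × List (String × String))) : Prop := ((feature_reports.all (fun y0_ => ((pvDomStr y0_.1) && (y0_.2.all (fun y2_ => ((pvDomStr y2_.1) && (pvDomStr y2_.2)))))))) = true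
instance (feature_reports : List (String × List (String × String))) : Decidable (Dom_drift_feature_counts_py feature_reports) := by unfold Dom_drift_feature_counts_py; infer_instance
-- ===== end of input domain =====

-- B replaces A's five-accumulator if/elif cascade by collecting the normalized non-empty
-- statuses, building a frequency table, and extracting the tallies in closed form (idiomatic).

-- ===== PORT A =====
-- one loop step of A's for-loop over (key, r) pairs; state = (total, warn, crit, missing_column, other)
def pvStepA (st : Int × Int × Int × Int × Int) (kv : String × List (String × String)) :
    Int × Int × Int × Int × Int :=
  let status := PySem.Str.strip ((kv.2.lookup "status").getD "")
  if status = "" then st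
  else if status = "missing_column" then (st.1 + 1, st.2.1, st.2.2.1, st.2.2.2.1 + 1, st.2.2.2.2)
  else if status = "warn" then (st.1 + 1, st.2.1 + 1, st.2.2.1, st.2.2.2.1, st.2.2.2.2)
  else if status = "crit" then (st.1 + 1, st.2.1, st.2.2.1 + 1, st.2.2.2.1, st.2.2.2.2)
  else if status = "ok" then (st.1 + 1, st.2.1, st.2.2.1, st.2.2.2.1, st.2.2.2.2)
  else (st.1, st.2.1, st.2.2.1, st.2.2.2.1, st.2.2.2.2 + 1)

def drift_feature_counts_py (feature_reports : List (String × List (String × String))) : List (String × Int) :=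
  let s := feature_reports.foldl pvStepA (0, 0, 0, 0, 0)
  [("total", s.1), ("warn", s.2.1), ("crit", s.2.2.1), ("missing_column", s.2.2.2.1), ("other", s.2.2.2.2)]

-- ===== PORT B =====
-- _norm_status(r): every value is a dict under the type convention; str(r.get("status") or "").strip()
def pvNormStatus (r : List (String × String)) : String :=
  PySem.Str.strip ((r.lookup "status").getD "")

def drift_feature_counts_py_alt (feature_reports : List (String × List (String × String))) : List (String × Int) :=
  let statuses := (feature_reports.map (fun kv => pvNormStatus kv.2)).filter (fun s => s != "")
  let counts := statuses.foldl (fun (d : PySem.Dict String Int) s => d.insert s (d.getD s 0 + 1)) PySem.Dict.empty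
  let warn := counts.getD "warn" 0
  let crit := counts.getD "crit" 0
  let missing_column := counts.getD "missing_column" 0
  let ok := counts.getD "ok" 0
  let total := warn + crit + missing_column + ok
  let other := (statuses.length : Int) - total
  [("total", total), ("warn", warn), ("crit", crit), ("missing_column", missing_column), ("other", other)]

-- ===== PRECONDITION & SPEC =====
def Spec_drift_feature_counts_py (feature_reports : List (String × List (String × String))) (out : List (String × Int)) : Prop := out = drift_feature_counts_py_alt feature_reports
instance (feature_reports : List (String × List (String × String))) (out : List (String × Int)) : Decidable (Spec_drift_feature_counts_py feature_reports out) := by unfold Spec_drift_feature_counts_py; infer_instance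

-- ===== CLAIM (what is proved, stated in full; the proofs are below) =====
def Claim_equal_drift_feature_counts_py : Prop := ∀ (feature_reports : List (String × List (String × String))), Dom_drift_feature_counts_py feature_reports → Spec_drift_feature_counts_py feature_reports (drift_feature_counts_py feature_reports)

-- ===== LEMMAS AND PROOFS =====

-- A's loop step as a function of the normalized status alone
def pvStepS (st : Int × Int × Int × Int × Int) (s : String) : Int × Int × Int × Int × Int :=
  if s = "" then st
  else if s = "missing_column" then (st.1 + 1, st.2.1, st.2.2.1, st.2.2.2.1 + 1, st.2.2.2.2)
  else if s = "warn" then (st.1 + 1, st.2.1 + 1, st.2.2.1, st.2.2.2.1, st.2.2.2.2)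
  else if s = "crit" then (st.1 + 1, st.2.1, st.2.2.1 + 1, st.2.2.2.1, st.2.2.2.2)
  else if s = "ok" then (st.1 + 1, st.2.1, st.2.2.1, st.2.2.2.1, st.2.2.2.2)
  else (st.1, st.2.1, st.2.2.1, st.2.2.2.1, st.2.2.2.2 + 1)

def pvCnt4 (l : List String) : Int :=
  (l.count "missing_column" : Int) + l.count "warn" + l.count "crit" + l.count "ok"

theorem pvFoldS_eq (ns : List String) (t w c m o : Int) :
    ns.foldl pvStepS (t, w, c, m, o) =
      (t + pvCnt4 (ns.filter (fun s => s != "")),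
       w + ((ns.filter (fun s => s != "")).count "warn" : Int),
       c + ((ns.filter (fun s => s != "")).count "crit" : Int),
       m + ((ns.filter (fun s => s != "")).count "missing_column" : Int),
       o + (((ns.filter (fun s => s != "")).length : Int)
            - pvCnt4 (ns.filter (fun s => s != "")))) := by
  induction ns generalizing t w c m o with
  | nil => simp [pvCnt4]
  | cons s rest ih =>
    by_cases h0 : s = ""
    · subst h0
      simp [pvStepS, ih]
    · have hfc : (s != "") = true := by simp [h0]
      simp only [List.foldl_cons, List.filter_cons, hfc, if_true]
      by_cases h1 : s = "missing_column"
      · subst h1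
        have hs : pvStepS (t, w, c, m, o) "missing_column" = (t + 1, w, c, m + 1, o) := by
          simp [pvStepS]
        rw [hs, ih]
        simp [pvCnt4, Prod.mk.injEq]
        omega
      · by_cases h2 : s = "warn"
        · subst h2
          have hs : pvStepS (t, w, c, m, o) "warn" = (t + 1, w + 1, c, m, o) := by
            simp [pvStepS]
          rw [hs, ih]
          simp [pvCnt4, Prod.mk.injEq]
          omega
        · by_cases h3 : s = "crit"
          · subst h3
            have hs : pvStepS (t, w, c, m, o) "crit" = (t + 1, w, c + 1, m, o) := by
              simp [pvStepS]
            rw [hs, ih]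
            simp [pvCnt4, Prod.mk.injEq]
            omega
          · by_cases h4 : s = "ok"
            · subst h4
              have hs : pvStepS (t, w, c, m, o) "ok" = (t + 1, w, c, m, o) := by
                simp [pvStepS]
              rw [hs, ih]
              simp [pvCnt4, Prod.mk.injEq]
              omega
            · have hs : pvStepS (t, w, c, m, o) s = (t, w, c, m, o + 1) := by
                simp [pvStepS, h0, h1, h2, h3, h4]
              rw [hs, ih]
              simp [pvCnt4, Prod.mk.injEq, h1, h2, h3, h4]
              omega

theorem getD_fold_count (l : List String) (v : String) :
    (l.foldl (fun (d : PySem.Dict String Int) s => d.insert s (d.getD s 0 + 1)) PySem.Dict.empty).getD v 0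
      = (l.count v : Int) := by
  rw [PySem.Dict.getD_foldl_insert_add_one]
  simp

-- ===== VERDICT (by name: the statement is the Claim_ definition above) =====
theorem drift_feature_counts_py_spec : Claim_equal_drift_feature_counts_py := by
  intro fr _
  show _ = _
  unfold drift_feature_counts_py drift_feature_counts_py_alt
  have hA : fr.foldl pvStepA (0, 0, 0, 0, 0)
      = (fr.map (fun kv => pvNormStatus kv.2)).foldl pvStepS (0, 0, 0, 0, 0) := by
    rw [List.foldl_map]
    rfl
  rw [hA, pvFoldS_eq]
  simp [getD_fold_count, pvCnt4, List.cons.injEq, Prod.mk.injEq]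
  omega
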